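-- pv_equiv track=rewrite | github.com/jackerzhang1/assignment4 | main.py | desc_graph
-- ===== SOURCE A (Python) =====
-- def is_symmetric(graph):
--     num_vertices = len(graph)
--     for i in range(num_vertices):
--         for j in range(num_vertices):
--             if graph[i][j] != graph[j][i]:
--                 return False
--     return True
--
-- def desc_graph(graph):
--     num_vertices = len(graph)
--     message = ''
--     message += 'Number of vertices = ' + str(num_vertices) + '\n'
--
--     non_zero = 0
--
--     for i in range(num_vertices):
--         for j in range(num_vertices):
--             if graph[i][j] > 0:
--                 non_zero += 1
--
--     num_edges = int(non_zero / 2)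
--     message += 'Number of edges = ' + str(num_edges) + '\n'
--     message += 'Symmetric = ' + str(is_symmetric(graph)) + '\n'
--     return message
-- ===== SOURCE B (Python) =====
-- def desc_graph(graph):
--     num_vertices = len(graph)
--     non_zero = 0
--     symmetric = True
--     for i in range(num_vertices):
--         if graph[i][i] > 0:
--             non_zero += 1
--         for j in range(i + 1, num_vertices):
--             a = graph[i][j]
--             b = graph[j][i]
--             non_zero += (a > 0) + (b > 0)
--             if a != b:
--                 symmetric = False
--     num_edges = non_zero // 2
--     return ('Number of vertices = ' + str(num_vertices) + '\n'
--             + 'Number of edges = ' + str(num_edges) + '\n'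
--             + 'Symmetric = ' + str(symmetric) + '\n')
-- ===== Notes on version B (the rewrite author's own statement) =====
-- stated objective: alternative
-- what changed: Replaces A's two separate full-matrix passes (a nested counting loop plus an element-wise symmetry scan with early return) by a single fused pass over the upper triangle that reads each off-diagonal pair (i,j)/(j,i) once, accumulating both the positive-entry count and a symmetry flag together.
import Mathlib
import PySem

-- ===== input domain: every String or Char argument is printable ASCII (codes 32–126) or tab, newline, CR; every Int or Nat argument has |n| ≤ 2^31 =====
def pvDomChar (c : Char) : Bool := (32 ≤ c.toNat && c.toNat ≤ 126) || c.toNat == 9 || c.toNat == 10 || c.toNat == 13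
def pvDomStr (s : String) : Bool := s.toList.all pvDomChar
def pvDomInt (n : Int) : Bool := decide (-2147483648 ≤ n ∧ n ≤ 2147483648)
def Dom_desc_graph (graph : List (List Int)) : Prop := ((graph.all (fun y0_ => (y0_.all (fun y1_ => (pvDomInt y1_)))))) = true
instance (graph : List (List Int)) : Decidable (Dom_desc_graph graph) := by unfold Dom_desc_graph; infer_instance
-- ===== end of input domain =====

-- B fuses A's two full-matrix passes (positive-entry count; element-wise symmetry
-- scan) into one pass over the upper triangle that reads each off-diagonal pair
-- once, accumulating the count and a symmetry flag together.


-- ===== PORT A =====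
-- graph[i][j] is ported as pyGetD (pyGetD graph i []) j 0: under Pre_ every index
-- hit by the loops is in range, so the defaults are never used.
def is_symmetric (graph : List (List Int)) : Bool :=
  let num_vertices : Int := graph.length
  (PySem.List.pyRange 0 num_vertices 1).all (fun i =>
    (PySem.List.pyRange 0 num_vertices 1).all (fun j =>
      PySem.List.pyGetD (PySem.List.pyGetD graph i []) j 0
        == PySem.List.pyGetD (PySem.List.pyGetD graph j []) i 0))

def desc_graph (graph : List (List Int)) : String :=
  let num_vertices : Int := graph.length
  let message := "" ++ "Number of vertices = " ++ PySem.Int.toStr num_vertices ++ "\n"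
  let non_zero : Int :=
    (PySem.List.pyRange 0 num_vertices 1).foldl (fun acc i =>
      (PySem.List.pyRange 0 num_vertices 1).foldl (fun acc j =>
        if PySem.List.pyGetD (PySem.List.pyGetD graph i []) j 0 > 0 then acc + 1 else acc) acc) 0
  let num_edges : Int := PySem.Int.truncdiv non_zero 2  -- int(non_zero / 2); exact: |non_zero| < 2^53
  let message := message ++ "Number of edges = " ++ PySem.Int.toStr num_edges ++ "\n"
  let message := message ++ "Symmetric = " ++ (if is_symmetric graph then "True" else "False") ++ "\n"
  message

-- ===== PORT B =====
-- one fused pass over the upper triangle: state (non_zero, symmetric)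
def desc_graph_alt (graph : List (List Int)) : String :=
  let num_vertices : Int := graph.length
  let st : Int × Bool :=
    (PySem.List.pyRange 0 num_vertices 1).foldl (fun st i =>
      let st1 : Int × Bool :=
        (if PySem.List.pyGetD (PySem.List.pyGetD graph i []) i 0 > 0
         then (st.1 + 1, st.2) else st)
      (PySem.List.pyRange (i + 1) num_vertices 1).foldl (fun st j =>
        let a := PySem.List.pyGetD (PySem.List.pyGetD graph i []) j 0
        let b := PySem.List.pyGetD (PySem.List.pyGetD graph j []) i 0
        ((st.1 + (if a > 0 then 1 else 0)) + (if b > 0 then 1 else 0),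
         if a ≠ b then false else st.2)) st1) ((0 : Int), true)
  let num_edges : Int := PySem.Int.floordiv st.1 2
  "Number of vertices = " ++ PySem.Int.toStr num_vertices ++ "\n"
    ++ "Number of edges = " ++ PySem.Int.toStr num_edges ++ "\n"
    ++ "Symmetric = " ++ (if st.2 then "True" else "False") ++ "\n"

-- ===== PRECONDITION & SPEC =====
-- exactly the inputs A returns on: graph[i][j] needs every row to have at least
-- len(graph) entries, otherwise A raises IndexError
def Pre_desc_graph (graph : List (List Int)) : Prop :=
  ∀ row ∈ graph, graph.length ≤ row.length
instance (graph : List (List Int)) : Decidable (Pre_desc_graph graph) := by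
  unfold Pre_desc_graph; infer_instance

def pvWitness_desc_graph : List (List Int) := [[0, 1], [1, 0]]

def Spec_desc_graph (graph : List (List Int)) (out : String) : Prop :=
  out = desc_graph_alt graph
instance (graph : List (List Int)) (out : String) : Decidable (Spec_desc_graph graph out) := by
  unfold Spec_desc_graph; infer_instance

-- ===== CLAIM =====
def Claim_equal_desc_graph : Prop :=
  ∀ (graph : List (List Int)), Dom_desc_graph graph → Pre_desc_graph graph →
    Spec_desc_graph graph (desc_graph graph)

-- ===== LEMMAS AND PROOFS =====

-- the matrix entry both ports read
def pvEnt (graph : List (List Int)) (i j : Int) : Int :=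
  PySem.List.pyGetD (PySem.List.pyGetD graph i []) j 0

def pvC (graph : List (List Int)) (i j : Int) : Int :=
  if pvEnt graph i j > 0 then 1 else 0

-- a loop 'ok := ok && h x' is l.all
theorem foldl_and_eq (l : List Int) (h : Int → Bool) (b : Bool) :
    l.foldl (fun ok x => ok && h x) b = (b && l.all h) := by
  induction l generalizing b with
  | nil => simp
  | cons x t ih => simp [List.foldl_cons, ih, Bool.and_assoc]

theorem sum_map_add (l : List Int) (f g : Int → Int) :
    (l.map (fun x => f x + g x)).sum = (l.map f).sum + (l.map g).sum := by
  induction l with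
  | nil => simp
  | cons x t ih => simp [ih]; ring

-- triangle decomposition of the square double sum
theorem triangle_sum (c : Int → Int → Int) (n : Nat) :
    ((PySem.List.pyRange 0 (n : Int) 1).map (fun i =>
      ((PySem.List.pyRange 0 (n : Int) 1).map (fun j => c i j)).sum)).sum
    = ((PySem.List.pyRange 0 (n : Int) 1).map (fun i =>
        c i i + ((PySem.List.pyRange (i + 1) (n : Int) 1).map
          (fun j => c i j + c j i)).sum)).sum := by
  induction n with
  | zero => simp [PySem.List.pyRange_one_eq_nil]
  | succ n ih =>
    have hsr : PySem.List.pyRange 0 ((n : Int) + 1) 1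
        = PySem.List.pyRange 0 (n : Int) 1 ++ [(n : Int)] :=
      PySem.List.pyRange_one_succ_right (by positivity)
    have hcast : ((n + 1 : Nat) : Int) = (n : Int) + 1 := by push_cast; ring
    have hnil : PySem.List.pyRange ((n : Int) + 1) ((n : Int) + 1) 1 = [] :=
      PySem.List.pyRange_one_eq_nil (le_refl _)
    rw [hcast, hsr]
    simp only [List.map_append, List.sum_append, List.map_cons, List.map_nil,
      List.sum_cons, List.sum_nil, add_zero, hnil]
    have htri' : ∀ i ∈ PySem.List.pyRange 0 (n : Int) 1,
        c i i + ((PySem.List.pyRange (i + 1) ((n : Int) + 1) 1).map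
            (fun j => c i j + c j i)).sum
        = (c i i + ((PySem.List.pyRange (i + 1) (n : Int) 1).map
            (fun j => c i j + c j i)).sum) + (c i (n : Int) + c (n : Int) i) := by
      intro i hi
      obtain ⟨h0, hn⟩ := PySem.List.mem_pyRange_one.mp hi
      rw [PySem.List.pyRange_one_succ_right (by omega :
        i + 1 ≤ (n : Int))]
      simp only [List.map_append, List.sum_append, List.map_cons, List.map_nil,
        List.sum_cons, List.sum_nil, add_zero]
      ring
    rw [List.map_congr_left htri']
    rw [sum_map_add (PySem.List.pyRange 0 (n : Int) 1)
      (fun i => ((PySem.List.pyRange 0 (n : Int) 1).map (fun j => c i j)).sum)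
      (fun i => c i (n : Int))]
    rw [sum_map_add (PySem.List.pyRange 0 (n : Int) 1)
      (fun i => c i i + ((PySem.List.pyRange (i + 1) (n : Int) 1).map
        (fun j => c i j + c j i)).sum)
      (fun i => c i (n : Int) + c (n : Int) i)]
    rw [sum_map_add (PySem.List.pyRange 0 (n : Int) 1)
      (fun i => c i (n : Int)) (fun i => c (n : Int) i)]
    rw [ih]
    ring_nf

-- A's counting loop as the square double sum
theorem A_count_eq (graph : List (List Int)) :
    (PySem.List.pyRange 0 (graph.length : Int) 1).foldl (fun acc i =>
      (PySem.List.pyRange 0 (graph.length : Int) 1).foldl (fun acc j =>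
        if PySem.List.pyGetD (PySem.List.pyGetD graph i []) j 0 > 0 then acc + 1 else acc) acc) 0
    = ((PySem.List.pyRange 0 (graph.length : Int) 1).map (fun i =>
        ((PySem.List.pyRange 0 (graph.length : Int) 1).map (fun j => pvC graph i j)).sum)).sum := by
  have hstep : ∀ (acc i : Int),
      (PySem.List.pyRange 0 (graph.length : Int) 1).foldl (fun acc j =>
        if PySem.List.pyGetD (PySem.List.pyGetD graph i []) j 0 > 0 then acc + 1 else acc) acc
      = acc + ((PySem.List.pyRange 0 (graph.length : Int) 1).map (fun j => pvC graph i j)).sum := by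
    intro acc i
    have h1 : (PySem.List.pyRange 0 (graph.length : Int) 1).foldl (fun acc j =>
          if PySem.List.pyGetD (PySem.List.pyGetD graph i []) j 0 > 0 then acc + 1 else acc) acc
        = (PySem.List.pyRange 0 (graph.length : Int) 1).foldl
            (fun acc j => acc + pvC graph i j) acc :=
      PySem.List.foldl_congr_mem _ _ _ _ (by
        intro b x _
        simp only [pvC, pvEnt]
        split_ifs <;> simp)
    rw [h1, PySem.List.foldl_add]
  have h2 : (PySem.List.pyRange 0 (graph.length : Int) 1).foldl (fun acc i =>
        (PySem.List.pyRange 0 (graph.length : Int) 1).foldl (fun acc j =>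
          if PySem.List.pyGetD (PySem.List.pyGetD graph i []) j 0 > 0 then acc + 1 else acc) acc) 0
      = (PySem.List.pyRange 0 (graph.length : Int) 1).foldl (fun acc i =>
          acc + ((PySem.List.pyRange 0 (graph.length : Int) 1).map
            (fun j => pvC graph i j)).sum) 0 :=
    PySem.List.foldl_congr_mem _ _ _ _ (by intro b x _; exact hstep b x)
  rw [h2, PySem.List.foldl_add]
  simp

-- B's fused loop splits into its two accumulators
theorem B_inner_eq (graph : List (List Int)) (i : Int) (p : Int × Bool) :
    ((PySem.List.pyRange (i + 1) (graph.length : Int) 1).foldl (fun st j =>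
        let a := PySem.List.pyGetD (PySem.List.pyGetD graph i []) j 0
        let b := PySem.List.pyGetD (PySem.List.pyGetD graph j []) i 0
        ((st.1 + (if a > 0 then 1 else 0)) + (if b > 0 then 1 else 0),
         if a ≠ b then false else st.2)) p)
    = (p.1 + ((PySem.List.pyRange (i + 1) (graph.length : Int) 1).map
          (fun j => pvC graph i j + pvC graph j i)).sum,
       p.2 && (PySem.List.pyRange (i + 1) (graph.length : Int) 1).all (fun j =>
          pvEnt graph i j == pvEnt graph j i)) := by
  have h1 : ((PySem.List.pyRange (i + 1) (graph.length : Int) 1).foldl (fun st j =>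
        let a := PySem.List.pyGetD (PySem.List.pyGetD graph i []) j 0
        let b := PySem.List.pyGetD (PySem.List.pyGetD graph j []) i 0
        ((st.1 + (if a > 0 then 1 else 0)) + (if b > 0 then 1 else 0),
         if a ≠ b then false else st.2)) p)
      = ((PySem.List.pyRange (i + 1) (graph.length : Int) 1).foldl (fun (st : Int × Bool) j =>
          ((fun acc j => acc + (pvC graph i j + pvC graph j i)) st.1 j,
           (fun ok j => ok && (pvEnt graph i j == pvEnt graph j i)) st.2 j)) p) :=
    PySem.List.foldl_congr_mem _ _ _ _ (by
      intro st x _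
      simp only [pvC, pvEnt, Prod.mk.injEq]
      constructor
      · exact add_assoc _ _ _
      · by_cases h : PySem.List.pyGetD (PySem.List.pyGetD graph i []) x 0
            = PySem.List.pyGetD (PySem.List.pyGetD graph x []) i 0 <;> simp [h])
  rw [h1]
  rw [show p = (p.1, p.2) from rfl]
  rw [PySem.List.foldl_prod_mk
    (f := fun acc j => acc + (pvC graph i j + pvC graph j i))
    (g := fun ok j => ok && (pvEnt graph i j == pvEnt graph j i))]
  rw [PySem.List.foldl_add, foldl_and_eq]

theorem B_fold_eq (graph : List (List Int)) :
    ((PySem.List.pyRange 0 (graph.length : Int) 1).foldl (fun st i =>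
      let st1 : Int × Bool :=
        (if PySem.List.pyGetD (PySem.List.pyGetD graph i []) i 0 > 0
         then (st.1 + 1, st.2) else st)
      (PySem.List.pyRange (i + 1) (graph.length : Int) 1).foldl (fun st j =>
        let a := PySem.List.pyGetD (PySem.List.pyGetD graph i []) j 0
        let b := PySem.List.pyGetD (PySem.List.pyGetD graph j []) i 0
        ((st.1 + (if a > 0 then 1 else 0)) + (if b > 0 then 1 else 0),
         if a ≠ b then false else st.2)) st1) ((0 : Int), true))
    = (((PySem.List.pyRange 0 (graph.length : Int) 1).map (fun i =>
          pvC graph i i + ((PySem.List.pyRange (i + 1) (graph.length : Int) 1).map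
            (fun j => pvC graph i j + pvC graph j i)).sum)).sum,
       (PySem.List.pyRange 0 (graph.length : Int) 1).all (fun i =>
          (PySem.List.pyRange (i + 1) (graph.length : Int) 1).all (fun j =>
            pvEnt graph i j == pvEnt graph j i))) := by
  have h1 : ((PySem.List.pyRange 0 (graph.length : Int) 1).foldl (fun st i =>
      let st1 : Int × Bool :=
        (if PySem.List.pyGetD (PySem.List.pyGetD graph i []) i 0 > 0
         then (st.1 + 1, st.2) else st)
      (PySem.List.pyRange (i + 1) (graph.length : Int) 1).foldl (fun st j =>
        let a := PySem.List.pyGetD (PySem.List.pyGetD graph i []) j 0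
        let b := PySem.List.pyGetD (PySem.List.pyGetD graph j []) i 0
        ((st.1 + (if a > 0 then 1 else 0)) + (if b > 0 then 1 else 0),
         if a ≠ b then false else st.2)) st1) ((0 : Int), true))
      = ((PySem.List.pyRange 0 (graph.length : Int) 1).foldl (fun (st : Int × Bool) i =>
          ((fun acc i => acc + (pvC graph i i
              + ((PySem.List.pyRange (i + 1) (graph.length : Int) 1).map
                (fun j => pvC graph i j + pvC graph j i)).sum)) st.1 i,
           (fun ok i => ok && (PySem.List.pyRange (i + 1) (graph.length : Int) 1).all (fun j =>
              pvEnt graph i j == pvEnt graph j i)) st.2 i)) ((0 : Int), true)) :=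
    PySem.List.foldl_congr_mem _ _ _ _ (by
      intro st i _
      show ((PySem.List.pyRange (i + 1) (graph.length : Int) 1).foldl _
        (if PySem.List.pyGetD (PySem.List.pyGetD graph i []) i 0 > 0
         then (st.1 + 1, st.2) else st)) = _
      rw [B_inner_eq]
      have hst1 : (if PySem.List.pyGetD (PySem.List.pyGetD graph i []) i 0 > 0
          then (st.1 + 1, st.2) else st) = (st.1 + pvC graph i i, st.2) := by
        simp only [pvC, pvEnt]
        split_ifs <;> simp
      rw [hst1]
      simp only [Prod.mk.injEq]
      exact ⟨by ring, trivial⟩)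
  rw [h1, PySem.List.foldl_prod_mk
    (f := fun acc i => acc + (pvC graph i i
        + ((PySem.List.pyRange (i + 1) (graph.length : Int) 1).map
          (fun j => pvC graph i j + pvC graph j i)).sum))
    (g := fun ok i => ok && (PySem.List.pyRange (i + 1) (graph.length : Int) 1).all (fun j =>
        pvEnt graph i j == pvEnt graph j i))]
  rw [PySem.List.foldl_add, foldl_and_eq]
  simp

theorem C_nonneg (graph : List (List Int)) (i j : Int) : 0 ≤ pvC graph i j := by
  unfold pvC; split_ifs <;> simp

-- int(x / 2) = x // 2 for the nonnegative count
theorem trunc_eq_floor (n : Int) (h : 0 ≤ n) :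
    PySem.Int.truncdiv n 2 = PySem.Int.floordiv n 2 := by
  unfold PySem.Int.truncdiv PySem.Int.floordiv
  rw [Int.tdiv_eq_ediv, Int.fdiv_eq_ediv]
  omega

theorem sum_nonneg_tri (graph : List (List Int)) :
    0 ≤ ((PySem.List.pyRange 0 (graph.length : Int) 1).map (fun i =>
        pvC graph i i + ((PySem.List.pyRange (i + 1) (graph.length : Int) 1).map
          (fun j => pvC graph i j + pvC graph j i)).sum)).sum := by
  apply List.sum_nonneg
  intro x hx
  simp only [List.mem_map] at hx
  obtain ⟨i, -, rfl⟩ := hx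
  have h2 : 0 ≤ ((PySem.List.pyRange (i + 1) (graph.length : Int) 1).map
      (fun j => pvC graph i j + pvC graph j i)).sum := by
    apply List.sum_nonneg
    intro y hy
    simp only [List.mem_map] at hy
    obtain ⟨j, -, rfl⟩ := hy
    have := C_nonneg graph i j
    have := C_nonneg graph j i
    omega
  have := C_nonneg graph i i
  omega

-- A's full symmetry scan agrees with B's upper-triangle scan
theorem sym_eq (graph : List (List Int)) :
    is_symmetric graph
      = (PySem.List.pyRange 0 (graph.length : Int) 1).all (fun i =>
          (PySem.List.pyRange (i + 1) (graph.length : Int) 1).all (fun j =>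
            pvEnt graph i j == pvEnt graph j i)) := by
  rw [Bool.eq_iff_iff]
  simp only [is_symmetric, List.all_eq_true, PySem.List.mem_pyRange_one, and_imp,
    beq_iff_eq, pvEnt]
  constructor
  · intro h i hi0 hin j hj0 hjn
    exact h i hi0 hin j (by omega) (by omega)
  · intro h i hi0 hin j hj0 hjn
    rcases lt_trichotomy i j with hij | hij | hij
    · exact h i hi0 hin j (by omega) (by omega)
    · rw [hij]
    · exact (h j hj0 hjn i (by omega) (by omega)).symm

-- ===== VERDICT =====
theorem desc_graph_spec : Claim_equal_desc_graph := by
  intro graph _ _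
  unfold Spec_desc_graph desc_graph desc_graph_alt
  simp only []
  rw [A_count_eq, triangle_sum (pvC graph) graph.length, B_fold_eq, sym_eq,
    trunc_eq_floor _ (sum_nonneg_tri graph)]
  apply String.toList_inj.mp
  simp
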